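-- pv_equiv track=rewrite | github.com/F4bian-pacheco/jslt-playground | backend/app/services/jslt_service.py | _split_object_pairs
-- ===== SOURCE A (Python) =====
-- from typing import Any, Dict, List, Optional, Union
--
-- def _split_object_pairs(content: str) -> List[str]:
--     """Split object content into key-value pairs."""
--     pairs = []
--     current_pair = ""
--     depth = 0
--     in_string = False
--     string_char = None
--
--     for char in content:
--         if not in_string and char in '"\'':
--             in_string = True
--             string_char = char
--         elif in_string and char == string_char:
--             in_string = False
--             string_char = None
--         elif not in_string:
--             if char in '{[':
--                 depth += 1
--             elif char in '}]':
--                 depth -= 1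
--             elif char == ',' and depth == 0:
--                 pairs.append(current_pair.strip())
--                 current_pair = ""
--                 continue
--
--         current_pair += char
--
--     if current_pair.strip():
--         pairs.append(current_pair.strip())
--
--     return pairs
-- ===== SOURCE B (Python) =====
-- def _split_object_pairs(content):
--     """Split object content into key-value pairs."""
--     # Phase 1: record indices of top-level commas.
--     bounds = []
--     depth = 0
--     in_string = False
--     string_char = None
--     for i, char in enumerate(content):
--         if not in_string and char in '"\'':
--             in_string = True
--             string_char = char
--         elif in_string and char == string_char:
--             in_string = False
--             string_char = None
--         elif not in_string:
--             if char in '{[':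
--                 depth += 1
--             elif char in '}]':
--                 depth -= 1
--             elif char == ',' and depth == 0:
--                 bounds.append(i)
--     # Phase 2: slice content between consecutive boundaries.
--     pairs = []
--     start = 0
--     for b in bounds:
--         pairs.append(content[start:b].strip())
--         start = b + 1
--     last = content[start:].strip()
--     if last:
--         pairs.append(last)
--     return pairs
-- ===== Notes on version B (the rewrite author's own statement) =====
-- stated objective: alternative
-- what changed: A accumulates each pair character-by-character in a growing string; B runs the same quote/depth state machine only to record the indices of top-level commas, then produces the pairs by slicing the input between consecutive boundaries.
import Mathlib
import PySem

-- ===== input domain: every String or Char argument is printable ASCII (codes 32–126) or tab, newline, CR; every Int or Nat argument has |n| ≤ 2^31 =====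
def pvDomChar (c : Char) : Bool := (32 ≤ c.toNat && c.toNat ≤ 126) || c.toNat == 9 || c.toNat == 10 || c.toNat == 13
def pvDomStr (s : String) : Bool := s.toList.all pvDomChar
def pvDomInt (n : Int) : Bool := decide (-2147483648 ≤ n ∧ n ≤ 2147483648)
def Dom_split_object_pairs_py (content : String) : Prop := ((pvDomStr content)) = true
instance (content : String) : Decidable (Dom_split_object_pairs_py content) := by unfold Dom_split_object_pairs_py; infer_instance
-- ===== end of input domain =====

-- B replaces A's character-accumulator loop by a boundary-index pass plus slicing (different decomposition, same cost).

-- ===== PORT A =====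
-- one iteration of A's for-loop; state = (pairs, current_pair, depth, in_string, string_char)
def splitAStep (st : List String × List Char × Int × Bool × Option Char) (char : Char) :
    List String × List Char × Int × Bool × Option Char :=
  let (pairs, cur, depth, inStr, sc) := st
  if inStr = false ∧ (char = '"' ∨ char = '\'') then
    (pairs, cur ++ [char], depth, true, some char)
  else if inStr = true ∧ some char = sc then
    (pairs, cur ++ [char], depth, false, none)
  else if inStr = false then
    if char = '{' ∨ char = '[' then (pairs, cur ++ [char], depth + 1, inStr, sc)
    else if char = '}' ∨ char = ']' then (pairs, cur ++ [char], depth - 1, inStr, sc)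
    else if char = ',' ∧ depth = 0 then
      (pairs ++ [String.ofList (PySem.Chars.strip cur)], [], depth, inStr, sc)
    else (pairs, cur ++ [char], depth, inStr, sc)
  else (pairs, cur ++ [char], depth, inStr, sc)

def split_object_pairs_py (content : String) : List String :=
  let st := content.toList.foldl splitAStep ([], [], 0, false, none)
  if PySem.Chars.strip st.2.1 ≠ [] then st.1 ++ [String.ofList (PySem.Chars.strip st.2.1)] else st.1

-- ===== PORT B =====
-- phase 1 of Source B: same quote/depth machine, but only records indices of top-level commas
def splitBCtlStep (st : List Int × Int × Bool × Option Char) (ic : Int × Char) :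
    List Int × Int × Bool × Option Char :=
  let (bounds, depth, inStr, sc) := st
  let (i, char) := ic
  if inStr = false ∧ (char = '"' ∨ char = '\'') then (bounds, depth, true, some char)
  else if inStr = true ∧ some char = sc then (bounds, depth, false, none)
  else if inStr = false then
    if char = '{' ∨ char = '[' then (bounds, depth + 1, inStr, sc)
    else if char = '}' ∨ char = ']' then (bounds, depth - 1, inStr, sc)
    else if char = ',' ∧ depth = 0 then (bounds ++ [i], depth, inStr, sc)
    else (bounds, depth, inStr, sc)
  else (bounds, depth, inStr, sc)

def split_object_pairs_py_alt (content : String) : List String :=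
  let cs := content.toList
  let bounds := ((PySem.List.enumerate cs 0).foldl splitBCtlStep ([], 0, false, none)).1
  -- phase 2 of Source B: slice between consecutive boundaries
  let p := bounds.foldl
    (fun (st : List String × Int) b =>
      (st.1 ++ [String.ofList (PySem.Chars.strip (PySem.List.slice cs (some st.2) (some b)))], b + 1))
    ([], 0)
  let last := PySem.Chars.strip (PySem.List.slice cs (some p.2) none)
  if last ≠ [] then p.1 ++ [String.ofList last] else p.1

-- ===== PRECONDITION & SPEC =====
def Spec_split_object_pairs_py (content : String) (out : List String) : Prop := out = split_object_pairs_py_alt content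
instance (content : String) (out : List String) : Decidable (Spec_split_object_pairs_py content out) := by unfold Spec_split_object_pairs_py; infer_instance

-- ===== CLAIM (what is proved, stated in full; the proofs are below) =====
def Claim_equal_split_object_pairs_py : Prop := ∀ (content : String), Dom_split_object_pairs_py content → Spec_split_object_pairs_py content (split_object_pairs_py content)

-- ===== LEMMAS AND PROOFS =====

-- shared control step: (depth, in_string, string_char) → char → new control × "is a top-level comma"
def pvStep (ctl : Int × Bool × Option Char) (char : Char) : (Int × Bool × Option Char) × Bool :=
  let (depth, inStr, sc) := ctl
  if inStr = false ∧ (char = '"' ∨ char = '\'') then ((depth, true, some char), false)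
  else if inStr = true ∧ some char = sc then ((depth, false, none), false)
  else if inStr = false then
    if char = '{' ∨ char = '[' then ((depth + 1, inStr, sc), false)
    else if char = '}' ∨ char = ']' then ((depth - 1, inStr, sc), false)
    else if char = ',' ∧ depth = 0 then ((depth, inStr, sc), true)
    else ((depth, inStr, sc), false)
  else ((depth, inStr, sc), false)

-- the raw (unstripped) top-level segments, commas excluded
def pvRawSegs (ctl : Int × Bool × Option Char) (cur : List Char) : List Char → List (List Char)
  | [] => [cur]
  | c :: cs =>
    let s := pvStep ctl c
    if s.2 then cur :: pvRawSegs s.1 [] cs else pvRawSegs s.1 (cur ++ [c]) cs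

-- strip every segment; keep the last only if nonempty after strip
def pvAssemble : List (List Char) → List String
  | [] => []
  | [s] => if PySem.Chars.strip s ≠ [] then [String.ofList (PySem.Chars.strip s)] else []
  | s :: t :: rest => String.ofList (PySem.Chars.strip s) :: pvAssemble (t :: rest)

-- boundary indices, recursively
def pvBounds (ctl : Int × Bool × Option Char) : List Char → Nat → List Nat
  | [], _ => []
  | c :: cs, i =>
    let s := pvStep ctl c
    if s.2 then i :: pvBounds s.1 cs (i + 1) else pvBounds s.1 cs (i + 1)

-- phase 2 of B, recursively over the boundary list
def pvBuild (full : List Char) : Nat → List Nat → List String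
  | start, [] =>
    if PySem.Chars.strip (full.drop start) ≠ [] then [String.ofList (PySem.Chars.strip (full.drop start))] else []
  | start, b :: bs =>
    String.ofList (PySem.Chars.strip ((full.drop start).take (b - start))) :: pvBuild full (b + 1) bs

theorem splitAStep_eq (pairs : List String) (cur : List Char) (ctl : Int × Bool × Option Char) (c : Char) :
    splitAStep (pairs, cur, ctl) c =
      (if (pvStep ctl c).2 then (pairs ++ [String.ofList (PySem.Chars.strip cur)], ([] : List Char), (pvStep ctl c).1)
       else (pairs, cur ++ [c], (pvStep ctl c).1)) := by
  obtain ⟨depth, inStr, sc⟩ := ctl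
  simp only [splitAStep, pvStep]
  split_ifs <;> simp_all

theorem splitBCtlStep_eq (acc : List Int) (ctl : Int × Bool × Option Char) (i : Int) (c : Char) :
    splitBCtlStep (acc, ctl) (i, c) =
      (if (pvStep ctl c).2 then acc ++ [i] else acc, (pvStep ctl c).1) := by
  obtain ⟨depth, inStr, sc⟩ := ctl
  simp only [splitBCtlStep, pvStep]
  split_ifs <;> simp_all

theorem pvRawSegs_ne_nil (ctl : Int × Bool × Option Char) (cur : List Char) (cs : List Char) :
    pvRawSegs ctl cur cs ≠ [] := by
  induction cs generalizing ctl cur with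
  | nil => simp [pvRawSegs]
  | cons c cs ih =>
    simp only [pvRawSegs]
    split <;> simp [ih]

theorem pvAssemble_cons (s : List Char) (L : List (List Char)) (h : L ≠ []) :
    pvAssemble (s :: L) = String.ofList (PySem.Chars.strip s) :: pvAssemble L := by
  cases L with
  | nil => exact absurd rfl h
  | cons t rest => rfl

-- A's fold computes pvAssemble of the raw segments
theorem lemA (cs : List Char) (pairs : List String) (cur : List Char) (ctl : Int × Bool × Option Char) :
    (let st := cs.foldl splitAStep (pairs, cur, ctl)
     if PySem.Chars.strip st.2.1 ≠ [] then st.1 ++ [String.ofList (PySem.Chars.strip st.2.1)] else st.1)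
      = pairs ++ pvAssemble (pvRawSegs ctl cur cs) := by
  induction cs generalizing pairs cur ctl with
  | nil =>
    simp only [List.foldl_nil, pvRawSegs, pvAssemble]
    split <;> simp
  | cons c cs ih =>
    simp only [List.foldl_cons, splitAStep_eq, pvRawSegs]
    by_cases h : (pvStep ctl c).2
    · simp only [h, if_true, ih, List.append_assoc,
        pvAssemble_cons _ _ (pvRawSegs_ne_nil _ _ _)]
      rfl
    · simp only [h, if_false, ih, Bool.false_eq_true]

-- B's phase-1 fold computes the recursive boundary list
theorem lemB1 (cs : List Char) (i : Nat) (ctl : Int × Bool × Option Char) (acc : List Int) :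
    ((PySem.List.enumerate cs (i : Int)).foldl splitBCtlStep (acc, ctl)).1
      = acc ++ (pvBounds ctl cs i).map (fun n : Nat => (n : Int)) := by
  induction cs generalizing i ctl acc with
  | nil => simp [PySem.List.enumerate_nil, pvBounds]
  | cons c cs ih =>
    rw [PySem.List.enumerate_cons]
    have hc : ((i : Int) + 1) = ((i + 1 : Nat) : Int) := by push_cast; ring
    simp only [List.foldl_cons, splitBCtlStep_eq, pvBounds, hc, ih]
    by_cases h : (pvStep ctl c).2 <;> simp [h]

-- B's phase-2 fold computes pvBuild
theorem lemB2 (full : List Char) (bs : List Nat) (start : Nat) (acc : List String) :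
    (let p := (bs.map (fun n : Nat => (n : Int))).foldl
        (fun (st : List String × Int) b =>
          (st.1 ++ [String.ofList (PySem.Chars.strip (PySem.List.slice full (some st.2) (some b)))], b + 1))
        (acc, (start : Int))
     if PySem.Chars.strip (PySem.List.slice full (some p.2) none) ≠ []
     then p.1 ++ [String.ofList (PySem.Chars.strip (PySem.List.slice full (some p.2) none))] else p.1)
      = acc ++ pvBuild full start bs := by
  induction bs generalizing start acc with
  | nil =>
    simp only [List.map_nil, List.foldl_nil, pvBuild, PySem.List.slice_from_natCast]
    split <;> simp
  | cons b bs ih =>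
    simp only [List.map_cons, List.foldl_cons, pvBuild]
    have hc : ((b : Int) + 1) = ((b + 1 : Nat) : Int) := by push_cast; ring
    rw [PySem.List.slice_natCast, hc, ih]
    simp

-- core: the raw segments are exactly the slices between the recorded boundaries
theorem lemC (cs full : List Char) (start i : Nat) (ctl : Int × Bool × Option Char)
    (hdrop : full.drop i = cs) (hle : start ≤ i) :
    pvAssemble (pvRawSegs ctl ((full.drop start).take (i - start)) cs)
      = pvBuild full start (pvBounds ctl cs i) := by
  induction cs generalizing start i ctl with
  | nil =>
    have hlen : full.length ≤ i := by
      by_contra h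
      have := List.drop_eq_nil_iff.mp hdrop
      omega
    have hseg : (full.drop start).take (i - start) = full.drop start := by
      apply List.take_of_length_le
      simp [List.length_drop]
      omega
    simp only [pvRawSegs, pvBounds, pvAssemble, pvBuild, hseg]
  | cons c cs ih =>
    have hi : i < full.length := by
      by_contra h
      have : full.drop i = [] := List.drop_eq_nil_iff.mpr (by omega)
      simp [this] at hdrop
    have hcons : full[i] :: full.drop (i + 1) = full.drop i := List.getElem_cons_drop ..
    rw [← hcons] at hdrop
    obtain ⟨hc, hrest⟩ : full[i] = c ∧ full.drop (i + 1) = cs := by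
      exact ⟨(List.cons.injEq ..).mp hdrop |>.1, (List.cons.injEq ..).mp hdrop |>.2⟩
    have hseg : (full.drop start).take (i + 1 - start) = (full.drop start).take (i - start) ++ [c] := by
      have h1 : i + 1 - start = (i - start) + 1 := by omega
      rw [h1, List.take_add_one]
      have : (full.drop start)[i - start]? = some c := by
        rw [List.getElem?_drop]
        have : start + (i - start) = i := by omega
        rw [this, List.getElem?_eq_getElem hi, hc]
      simp [this]
    simp only [pvRawSegs, pvBounds]
    by_cases h : (pvStep ctl c).2 = true
    · rw [if_pos h, if_pos h]
      rw [pvAssemble_cons _ _ (pvRawSegs_ne_nil _ _ _)]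
      simp only [pvBuild]
      have hI := ih (i + 1) (i + 1) (pvStep ctl c).1 hrest (by omega)
      simp only [Nat.sub_self, List.take_zero] at hI
      rw [hI]
    · rw [if_neg h, if_neg h, ← hseg]
      exact ih start (i + 1) _ hrest (by omega)

-- ===== VERDICT (by name: the statement is the Claim_ definition above) =====
theorem split_object_pairs_py_spec : Claim_equal_split_object_pairs_py := by
  intro content _
  unfold Spec_split_object_pairs_py split_object_pairs_py split_object_pairs_py_alt
  have hA := lemA content.toList [] [] (0, false, none)
  have hB1 := lemB1 content.toList 0 (0, false, none) []
  have hB2 := lemB2 content.toList (pvBounds (0, false, none) content.toList 0) 0 []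
  have hC := lemC content.toList content.toList 0 0 (0, false, none) (by simp) (by omega)
  simp only [List.nil_append, Nat.sub_self, List.drop_zero, List.take_zero] at hA hB1 hB2 hC
  simp only [Nat.cast_zero] at hB1 hB2
  rw [hA, hC]
  dsimp only
  rw [hB1]
  exact hB2.symm
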